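-- pv_equiv track=rewrite | github.com/recogni/open-register-design-tool | src/recogni/system_rdl/writers/recogni_writer.py | _c_template_header
-- ===== SOURCE A (Python) =====
-- def _c_template_def(t):
--     typemap = {
--         # Add types that you want to convert here.
--     }
--     typ = typemap.get(t[0], "int")
--     if t[1] == None or t[1] == -1:
--         return "%s %s" % (typ, t[0])
--     return "%s %s=%s" % (typ, t[0], t[1])
--
-- def _c_template_header(tts):
--     # Default value initialized template types go last.
--     tt = []
--     for t in tts:
--         if t[1] == None or t[1] == -1:
--             tt.append(t)
--     for t in tts:
--         if t[1] != None and t[1] != -1: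
--             tt.append(t)
--     if len(tt) == 0:
--         return ""
--     return "template <%s>\n" % ", ".join([_c_template_def(t) for t in tt])
-- ===== SOURCE B (Python) =====
-- def _c_template_def(t):
--     typemap = {
--         # Add types that you want to convert here.
--     }
--     typ = typemap.get(t[0], "int")
--     if t[1] == None or t[1] == -1:
--         return "%s %s" % (typ, t[0])
--     return "%s %s=%s" % (typ, t[0], t[1])
--
-- def _c_template_header(tts):
--     # Stable sort: no-default template args first, defaulted ones last,
--     # original order preserved within each group.
--     tt = sorted(tts, key=lambda t: not (t[1] == None or t[1] == -1))
--     if not tt: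
--         return ""
--     return "template <%s>\n" % ", ".join(_c_template_def(t) for t in tt)
-- ===== Notes on version B (the rewrite author's own statement) =====
-- stated objective: simpler
-- what changed: A's two accumulation loops (no-default args collected first, defaulted args appended in a second pass) are replaced by one stable sorted() call keyed on whether the arg has a default; stability gives exactly A's partition order.
import Mathlib
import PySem

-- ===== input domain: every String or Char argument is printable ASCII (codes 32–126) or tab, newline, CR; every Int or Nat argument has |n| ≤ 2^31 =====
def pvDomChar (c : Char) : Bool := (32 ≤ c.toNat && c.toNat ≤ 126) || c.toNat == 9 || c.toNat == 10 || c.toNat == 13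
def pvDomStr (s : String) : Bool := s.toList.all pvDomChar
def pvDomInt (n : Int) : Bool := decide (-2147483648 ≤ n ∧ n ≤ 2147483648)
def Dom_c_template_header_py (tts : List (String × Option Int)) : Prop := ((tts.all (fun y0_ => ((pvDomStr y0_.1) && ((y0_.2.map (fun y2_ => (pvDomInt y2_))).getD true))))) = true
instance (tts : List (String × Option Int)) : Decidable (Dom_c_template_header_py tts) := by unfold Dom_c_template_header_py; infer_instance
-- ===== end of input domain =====

-- B replaces A's two accumulation passes with one stable sort on "has a default" (simpler, one pass over the intent).

-- ===== PORT A =====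
-- shared helper _c_template_def (identical in Source A and Source B)
def cTemplateDef (t : String × Option Int) : String :=
  let typemap : PySem.Dict String String := PySem.Dict.empty   -- empty typemap literal
  let typ := PySem.Dict.getD typemap t.1 "int"
  if t.2 = none ∨ t.2 = some (-1) then
    typ ++ " " ++ t.1
  else
    -- here t.2 = some v; "%s" of the int is str(v)
    typ ++ " " ++ t.1 ++ "=" ++ PySem.Int.toStr (t.2.getD 0)

def c_template_header_py (tts : List (String × Option Int)) : String :=
  let tt := tts.foldl (fun acc t => if t.2 = none ∨ t.2 = some (-1) then acc ++ [t] else acc)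
              ([] : List (String × Option Int))
  let tt := tts.foldl (fun acc t => if ¬ (t.2 = none) ∧ ¬ (t.2 = some (-1)) then acc ++ [t] else acc) tt
  if tt.length = 0 then ""
  else "template <" ++ PySem.Str.join ", " (tt.map cTemplateDef) ++ ">\n"

-- ===== PORT B =====
def c_template_header_py_alt (tts : List (String × Option Int)) : String :=
  let tt := PySem.List.sorted tts (fun t => !(decide (t.2 = none ∨ t.2 = some (-1)))) false
  if tt = [] then ""
  else "template <" ++ PySem.Str.join ", " (tt.map cTemplateDef) ++ ">\n"

-- ===== PRECONDITION & SPEC =====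
def Spec_c_template_header_py (tts : List (String × Option Int)) (out : String) : Prop := out = c_template_header_py_alt tts
instance (tts : List (String × Option Int)) (out : String) : Decidable (Spec_c_template_header_py tts out) := by unfold Spec_c_template_header_py; infer_instance

-- ===== CLAIM (what is proved, stated in full; the proofs are below) =====
def Claim_equal_c_template_header_py : Prop := ∀ (tts : List (String × Option Int)), Dom_c_template_header_py tts → Spec_c_template_header_py tts (c_template_header_py tts)

-- ===== LEMMAS AND PROOFS =====

theorem insertBy_all_false {α : Type} (bef : α → α → Bool) (x : α) :
    ∀ (L : List α), (∀ y ∈ L, bef x y = false) →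
      PySem.List.insertBy bef x L = L ++ [x] := by
  intro L
  induction L with
  | nil => intro _; simp [PySem.List.insertBy]
  | cons a L ih =>
    intro h
    simp [PySem.List.insertBy, h a (by simp)]
    exact ih (fun y hy => h y (by simp [hy]))

theorem insertBy_cons_true {α : Type} (bef : α → α → Bool) (x a : α) (L : List α)
    (h : bef x a = true) : PySem.List.insertBy bef x (a :: L) = x :: a :: L := by
  simp [PySem.List.insertBy, h]

theorem insertBy_append {α : Type} (bef : α → α → Bool) (x : α) :
    ∀ (F T : List α), (∀ y ∈ F, bef x y = false) →
      PySem.List.insertBy bef x (F ++ T) = F ++ PySem.List.insertBy bef x T := by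
  intro F T
  induction F with
  | nil => intro _; simp
  | cons a F ih =>
    intro h
    simp [PySem.List.insertBy, h a (by simp)]
    exact ih (fun y hy => h y (by simp [hy]))

-- the key of PySem.List.sorted in port B
theorem sorted_bool_partition {α : Type} (key : α → Bool) :
    ∀ (xs F T : List α), (∀ y ∈ F, key y = false) → (∀ y ∈ T, key y = true) →
      xs.foldl (fun acc x => PySem.List.insertBy (fun a b => decide (key a < key b)) x acc) (F ++ T)
        = (F ++ xs.filter (fun x => !key x)) ++ (T ++ xs.filter key) := by
  intro xs
  induction xs with
  | nil => intro F T _ _; simp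
  | cons x xs ih =>
    intro F T hF hT
    simp only [List.foldl_cons]
    by_cases hx : key x = true
    · have hall : ∀ y ∈ F ++ T, (fun a b => decide (key a < key b)) x y = false := by
        intro y _; simp [hx]
      rw [insertBy_all_false _ _ _ hall, List.append_assoc]
      rw [ih F (T ++ [x]) hF (by intro y hy; rcases List.mem_append.1 hy with h | h
                                 · exact hT y h
                                 · simp at h; simpa [h] using hx)]
      simp [hx, List.append_assoc]
    · have hxf : key x = false := by simpa using hx
      have hbef : ∀ y ∈ F, (fun a b => decide (key a < key b)) x y = false := by
        intro y hy; simp [hxf, hF y hy]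
      rw [insertBy_append _ _ _ _ hbef]
      have hins : PySem.List.insertBy (fun a b => decide (key a < key b)) x T = x :: T := by
        cases T with
        | nil => simp [PySem.List.insertBy]
        | cons t T' =>
          exact insertBy_cons_true _ _ _ _ (by simp [hxf, hT t (by simp), Bool.lt_iff])
      rw [hins]
      have : F ++ x :: T = (F ++ [x]) ++ T := by simp
      rw [this, ih (F ++ [x]) T (by intro y hy; rcases List.mem_append.1 hy with h | h
                                    · exact hF y h
                                    · simp at h; simpa [h] using hxf) hT]
      simp [hxf, List.append_assoc]

theorem c_template_header_py_lists (tts : List (String × Option Int)) :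
    PySem.List.sorted tts (fun t => !(decide (t.2 = none ∨ t.2 = some (-1)))) false
      = tts.filter (fun t => decide (t.2 = none ∨ t.2 = some (-1)))
        ++ tts.filter (fun t => !(decide (t.2 = none ∨ t.2 = some (-1)))) := by
  have h := sorted_bool_partition (fun t : String × Option Int => !(decide (t.2 = none ∨ t.2 = some (-1)))) tts [] []
  simp only [List.nil_append, List.append_nil] at h
  have h' := h (by intro y hy; simp at hy) (by intro y hy; simp at hy)
  simpa [PySem.List.sorted, Bool.not_not] using h'

-- ===== VERDICT (by name: the statement is the Claim_ definition above) =====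
theorem c_template_header_py_spec : Claim_equal_c_template_header_py := by
  intro tts _
  unfold Spec_c_template_header_py c_template_header_py c_template_header_py_alt
  dsimp only
  rw [c_template_header_py_lists]
  rw [PySem.List.foldl_append_ite_eq_filter, PySem.List.foldl_append_ite_eq_filter]
  have hfil : tts.filter (fun t => decide (¬ (t.2 = none) ∧ ¬ (t.2 = some (-1))))
      = tts.filter (fun t => !(decide (t.2 = none ∨ t.2 = some (-1)))) := by
    apply List.filter_congr
    intro t _
    by_cases h1 : t.2 = none <;> by_cases h2 : t.2 = some (-1) <;> simp [h1, h2]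
  rw [hfil]
  simp only [List.length_eq_zero_iff, List.nil_append]
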